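-- pv_equiv track=rewrite | github.com/ellepannitto/patchwork | Pezzo.py | count_hor
-- ===== SOURCE A (Python) =====
-- def count_hor(mat):
--
-- 	r = []
--
-- 	for line in mat:
-- 		maxlen = 0
-- 		l = 0
-- 		for x in line:
-- 			if x == 'x':
-- 				l +=1
-- 			else:
-- 				l=0
--
-- 			if l > maxlen:
-- 				maxlen=l
--
-- 		r.append(maxlen)
--
-- 	return r
-- ===== SOURCE B (Python) =====
-- from itertools import groupby
--
-- def count_hor(mat):
--     return [max((sum(1 for _ in g) for v, g in groupby(line) if v == 'x'), default=0)
--             for line in mat]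
-- ===== Notes on version B (the rewrite author's own statement) =====
-- stated objective: idiomatic
-- what changed: Replaces the manual counter/maximum scan with a groupby run decomposition: each row is split into maximal runs of equal elements and the answer is the max length among runs of 'x' (default 0).
import Mathlib
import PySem

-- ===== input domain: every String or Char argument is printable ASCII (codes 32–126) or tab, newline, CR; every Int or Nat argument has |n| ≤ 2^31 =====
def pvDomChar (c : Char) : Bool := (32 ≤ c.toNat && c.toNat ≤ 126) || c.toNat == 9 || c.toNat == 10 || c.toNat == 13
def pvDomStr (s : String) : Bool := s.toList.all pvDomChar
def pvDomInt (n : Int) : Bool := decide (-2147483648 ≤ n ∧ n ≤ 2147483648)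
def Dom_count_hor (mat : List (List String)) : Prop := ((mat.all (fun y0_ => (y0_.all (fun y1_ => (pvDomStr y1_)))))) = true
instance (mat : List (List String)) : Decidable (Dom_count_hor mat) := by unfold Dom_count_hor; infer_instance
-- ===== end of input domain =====

-- B replaces A's manual counter/running-maximum scan with a groupby run decomposition
-- (max length among maximal runs of "x", default 0); idiomatic, same cost, return values identical.

-- ===== PORT A =====
-- r = []; for line: maxlen=0; l=0; for x: l = l+1 if x=='x' else 0; if l>maxlen: maxlen=l; r.append(maxlen)
def count_hor (mat : List (List String)) : List Int :=
  mat.foldl (fun r line =>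
    r ++ [(line.foldl (fun (s : Int × Int) x =>
      let l : Int := if x == "x" then s.2 + 1 else 0
      (if l > s.1 then l else s.1, l)) (0, 0)).1]) []

-- ===== PORT B =====
-- itertools.groupby: split a row into maximal runs of equal elements, as (key, length) pairs
def pyRuns (line : List String) : List (String × Nat) :=
  match line with
  | [] => []
  | x :: xs =>
    (x, (xs.takeWhile (· == x)).length + 1) :: pyRuns (xs.dropWhile (· == x))
termination_by line.length
decreasing_by
  simpa using Nat.lt_succ_of_le (List.length_dropWhile_le _ _)

-- max(lengths of runs with key 'x', default=0)
def rowMax (line : List String) : Int :=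
  ((pyRuns line).filterMap (fun p => if p.1 == "x" then some (Int.ofNat p.2) else none)).foldl max 0

def count_hor_alt (mat : List (List String)) : List Int :=
  mat.map rowMax

-- ===== PRECONDITION & SPEC =====
def Spec_count_hor (mat : List (List String)) (out : List Int) : Prop := out = count_hor_alt mat
instance (mat : List (List String)) (out : List Int) : Decidable (Spec_count_hor mat out) := by unfold Spec_count_hor; infer_instance

-- ===== CLAIM (what is proved, stated in full; the proofs are below) =====
def Claim_equal_count_hor : Prop := ∀ (mat : List (List String)), Dom_count_hor mat → Spec_count_hor mat (count_hor mat)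

-- ===== LEMMAS AND PROOFS =====

-- length of the leading run of "x"
def leadX (line : List String) : Int := Int.ofNat (line.takeWhile (· == "x")).length

theorem leadX_nonneg (line : List String) : 0 ≤ leadX line := by
  simp [leadX]

theorem foldl_max_shift (l : List Int) (a : Int) (ha : 0 ≤ a) :
    List.foldl max a l = max a (List.foldl max 0 l) := by
  induction l generalizing a with
  | nil => simp [List.foldl]; omega
  | cons x xs ih =>
    simp only [List.foldl]
    rw [ih (max a x) (le_trans ha (le_max_left _ _)), ih (max 0 x) (le_max_left _ _)]
    omega

theorem rowMax_nonneg (line : List String) : 0 ≤ rowMax line := by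
  unfold rowMax
  rw [foldl_max_shift _ 0 le_rfl]
  omega

theorem rowMax_cons (x : String) (xs : List String) :
    rowMax (x :: xs) =
      if x == "x" then
        max (Int.ofNat ((xs.takeWhile (· == x)).length + 1)) (rowMax (xs.dropWhile (· == x)))
      else rowMax (xs.dropWhile (· == x)) := by
  by_cases hx : (x == "x") = true
  · have hx' : x = "x" := by simpa [beq_iff_eq] using hx
    subst hx'
    simp only [rowMax, pyRuns, List.filterMap_cons, BEq.rfl, if_pos, List.foldl_cons]
    rw [foldl_max_shift _ _ (le_max_left _ _)]
    have := rowMax_nonneg (xs.dropWhile (· == "x"))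
    simp only [rowMax] at this ⊢
    omega
  · have hx' : ¬ x = "x" := by simpa [beq_iff_eq] using hx
    simp [rowMax, pyRuns, hx, hx']

-- dropping a leading run of a non-"x" key does not change rowMax
theorem rowMax_dropWhile (xs : List String) (x : String) (hx : ¬ (x == "x") = true) :
    rowMax (xs.dropWhile (· == x)) = rowMax xs := by
  cases xs with
  | nil => simp
  | cons y t =>
    by_cases hy : (y == x) = true
    · have hyx : y = x := by simpa [beq_iff_eq] using hy
      subst hyx
      rw [List.dropWhile_cons_of_pos (by simp), rowMax_cons, if_neg hx]
    · rw [List.dropWhile_cons_of_neg (by simpa using hy)]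

theorem leadX_head_ne (xs : List String) (h : ¬ xs.head? = some "x") : leadX xs = 0 := by
  cases xs with
  | nil => simp [leadX]
  | cons y t =>
    simp only [List.head?_cons, Option.some.injEq] at h
    have hb : (y == "x") = false := by simpa [beq_iff_eq] using h
    simp [leadX, List.takeWhile, hb]

theorem leadX_x_cons (xs : List String) : leadX ("x" :: xs) = 1 + leadX xs := by
  simp [leadX, List.takeWhile]; omega

theorem rowMax_x_cons (xs : List String) :
    rowMax ("x" :: xs) = max (1 + leadX xs) (rowMax xs) := by
  rw [rowMax_cons, if_pos (by simp)]
  cases xs with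
  | nil => simp [rowMax, pyRuns, leadX]
  | cons y t =>
    by_cases hy : (y == "x") = true
    · have hy' : y = "x" := by simpa [beq_iff_eq] using hy
      subst hy'
      rw [List.takeWhile_cons_of_pos (by simp), List.dropWhile_cons_of_pos (by simp),
        rowMax_cons, if_pos (by simp), leadX_x_cons]
      have h1 := rowMax_nonneg (t.dropWhile (· == "x"))
      simp only [leadX, List.length_cons, Int.max_def, Int.ofNat_eq_natCast]
      push_cast
      split_ifs <;> omega
    · have hy' : ¬ y = "x" := by simpa [beq_iff_eq] using hy
      rw [List.takeWhile_cons_of_neg (by simpa using hy),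
        List.dropWhile_cons_of_neg (by simpa using hy), leadX_head_ne _ (by simp [hy'])]
      simp

theorem leadX_le_rowMax (xs : List String) (h : xs.head? = some "x") :
    leadX xs ≤ rowMax xs := by
  cases xs with
  | nil => simp at h
  | cons y t =>
    simp only [List.head?_cons, Option.some.injEq] at h
    subst h
    rw [rowMax_x_cons, leadX_x_cons]
    have := rowMax_nonneg t
    omega

theorem A_row (line : List String) :
    ∀ (m l : Int), 0 ≤ l → l ≤ m →
      (line.foldl (fun (s : Int × Int) x =>
        let l : Int := if x == "x" then s.2 + 1 else 0
        (if l > s.1 then l else s.1, l)) (m, l)).1 =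
      max m (max (if line.head? = some "x" then l + leadX line else 0) (rowMax line)) := by
  induction line with
  | nil =>
    intro m l hl hlm
    simp [rowMax, pyRuns, List.foldl]
    omega
  | cons x xs ih =>
    intro m l hl hlm
    rw [List.foldl_cons]
    by_cases hx : (x == "x") = true
    · have hx' : x = "x" := by simpa [beq_iff_eq] using hx
      subst hx'
      simp only [BEq.rfl, if_pos]
      have step : ((if l + 1 > m then l + 1 else m : Int), (l + 1 : Int)) =
          (max m (l + 1), l + 1) := by
        simp only [Prod.mk.injEq, and_true]
        omega
      rw [step, ih (max m (l + 1)) (l + 1) (by omega) (by omega)]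
      rw [rowMax_x_cons, leadX_x_cons]
      simp only [List.head?_cons]
      by_cases hh : xs.head? = some "x"
      · rw [if_pos hh]
        have := leadX_nonneg xs
        have := rowMax_nonneg xs
        simp only [Int.max_def]
        split_ifs <;> omega
      · rw [if_neg hh, leadX_head_ne _ hh]
        have := rowMax_nonneg xs
        simp only [Int.max_def]
        split_ifs <;> omega
    · have hx' : ¬ x = "x" := by simpa [beq_iff_eq] using hx
      have hm : ¬ (0 : Int) > m := by omega
      simp only [hx, Bool.false_eq_true, if_false, hm]
      rw [ih m 0 le_rfl (by omega)]
      conv_rhs => rw [rowMax_cons, if_neg hx, List.head?_cons]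
      rw [rowMax_dropWhile _ _ hx]
      conv_rhs => rw [if_neg (show ¬ some x = some "x" by simpa using hx')]
      by_cases hh : xs.head? = some "x"
      · rw [if_pos hh]
        have h1 := leadX_le_rowMax xs hh
        have h2 := leadX_nonneg xs
        simp only [Int.max_def]
        split_ifs <;> omega
      · rw [if_neg hh]

theorem A_row₀ (line : List String) :
    (line.foldl (fun (s : Int × Int) x =>
      let l : Int := if x == "x" then s.2 + 1 else 0
      (if l > s.1 then l else s.1, l)) (0, 0)).1 = rowMax line := by
  rw [A_row line 0 0 le_rfl le_rfl]
  by_cases hh : line.head? = some "x"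
  · rw [if_pos hh]
    have := leadX_le_rowMax line hh
    have := rowMax_nonneg line
    omega
  · rw [if_neg hh]
    have := rowMax_nonneg line
    omega

theorem fold_append (mat : List (List String)) (g : List String → Int) (acc : List Int) :
    mat.foldl (fun r line => r ++ [g line]) acc = acc ++ mat.map g := by
  induction mat generalizing acc with
  | nil => simp
  | cons x xs ih => simp [List.foldl, ih]

-- ===== VERDICT (by name: the statement is the Claim_ definition above) =====
theorem count_hor_spec : Claim_equal_count_hor := by
  intro mat _
  unfold Spec_count_hor count_hor count_hor_alt
  rw [fold_append]
  simp only [List.nil_append]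
  exact List.map_congr_left (fun line _ => A_row₀ line)
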